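-- pv_equiv track=rewrite | github.com/pypi-data/pypi-mirror-339 | packages/b2bTools/b2bTools-3.0.8b3.tar.gz/b2bTools-3.0.8b3/b2bTools/general/ccpn/universal/Util.py | documentationFormat
-- ===== SOURCE A (Python) =====
-- def compactStringList(stringList, separator='', maxChars=80):
--   """ compact stringList into shorter list of longer strings,
--   each either made from a single start string, or no longer than maxChars
--
--   From previous breakString function.
--   Modified to speed up and add parameter defaults, Rasmus Fogh 28 Aug 2003
--   Modified to split into two functions
--   and to add separator to end of each line, Rasmus Fogh 12 Sep 03
--   Modified to separate string breaking from list modification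
--   Rasmus Fogh 29/6/06
--   Modified to return single-element lists unchanged
--   Rasmus Fogh 29/6/06
--   """
--
--   result = []
--
--   if not stringList:
--     return result
--   elif len(stringList) ==1:
--     return stringList[:]
--
--   seplength = len(separator)
--
--   nchars = len(stringList[0])
--   start=0
--   for n in range(1,len(stringList)):
--     i = len(stringList[n])
--     if nchars + i + (n-start)*seplength > maxChars:
--       result.append(separator.join(stringList[start:n] + ['']))
--       start = n
--       nchars = i
--     else:
--       nchars = nchars + i
--   result.append(separator.join(stringList[start:len(stringList)]))
--
--   return result
--
-- def documentationFormat(text):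
--   """ Converts text to a multiline string, and returns a string literal
--   expression with one line per line that evaluates to the multiline string
--   Modified to separate string breaking from list modification
--   Rasmus Fogh 29/6/06
--   """
--
--   if not text:
--     return '""'
--
--   ll = []
--
--   for ss in text.splitlines(True):
--     ll.extend(compactStringList(ss.split(' '), separator=' ',  maxChars=60))
--
--   if len(ll) == 1:
--     return repr(ll[0])
--
--   if not ll[-1]:
--     ll[-1] = '\n'
--   elif ll[-1][-1] != '\n':
--     ll[-1] = ll[-1] + '\n'
--
--   return """(%s
-- )""" % '\n'.join(map(repr,ll))
-- ===== SOURCE B (Python) =====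
-- def documentationFormat(text):
--     """Character-level re-implementation: never splits lines into word lists;
--     instead repeatedly cuts each physical line at the last space within the
--     60-char budget (or the first space when a single word overflows)."""
--     if not text:
--         return '""'
--     ll = []
--     for s in text.splitlines(True):
--         while len(s) > 60 and ' ' in s:
--             cut = s.rfind(' ', 0, 61)
--             if cut < 0:
--                 cut = s.index(' ')
--             ll.append(s[:cut + 1])
--             s = s[cut + 1:]
--         ll.append(s)
--     if len(ll) == 1:
--         return repr(ll[0])
--     if not ll[-1]:
--         ll[-1] = '\n'
--     elif ll[-1][-1] != '\n':
--         ll[-1] = ll[-1] + '\n'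
--     return '(%s\n)' % '\n'.join(map(repr, ll))
-- ===== Notes on version B (the rewrite author's own statement) =====
-- stated objective: alternative
-- what changed: A splits each line into a word list and greedily packs the words with a counting loop over indices (separator arithmetic and slices); B never builds a word list: it scans each line as a raw string, repeatedly cutting at the last space whose index fits the 60-character budget (a bounded rfind, falling back to the first space when a single oversized word leads), and slicing the emitted piece off the line.
import Mathlib
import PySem

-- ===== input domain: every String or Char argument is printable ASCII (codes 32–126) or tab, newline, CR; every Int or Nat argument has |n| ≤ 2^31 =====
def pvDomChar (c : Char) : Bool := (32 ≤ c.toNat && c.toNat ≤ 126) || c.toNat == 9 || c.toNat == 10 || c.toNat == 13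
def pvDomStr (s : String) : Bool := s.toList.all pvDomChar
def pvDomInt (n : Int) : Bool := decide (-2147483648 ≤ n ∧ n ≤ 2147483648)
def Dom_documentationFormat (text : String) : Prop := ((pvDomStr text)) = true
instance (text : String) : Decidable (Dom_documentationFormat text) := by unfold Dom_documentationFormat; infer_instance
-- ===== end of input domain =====

-- B replaces A's word-splitting + greedy word-packing helper by a character-level loop that
-- repeatedly cuts each physical line at the last space inside the 60-char budget; objective: alternative.

-- shared built-in ports (Python primitives, not algorithm code; exact on Dom):
-- text.splitlines(True) — keepends; on Dom the only line breaks are '\n', '\r', '\r\n'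
def pvSplitlinesKeep : List Char → List Char → List (List Char)
  | [], cur => if cur.isEmpty then [] else [cur]
  | '\r' :: '\n' :: rest, cur => (cur ++ ['\r', '\n']) :: pvSplitlinesKeep rest []
  | '\r' :: rest, cur => (cur ++ ['\r']) :: pvSplitlinesKeep rest []
  | c :: rest, cur =>
    if c = '\n' then (cur ++ ['\n']) :: pvSplitlinesKeep rest []
    else pvSplitlinesKeep rest (cur ++ [c])

-- repr(s) — exact for strings of printable ASCII plus tab/newline/CR (the Dom charset)
def pvReprEsc (quote : Char) (c : Char) : List Char :=
  if c = '\\' then ['\\', '\\']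
  else if c = quote then ['\\', quote]
  else if c = '\t' then ['\\', 't']
  else if c = '\n' then ['\\', 'n']
  else if c = '\r' then ['\\', 'r']
  else [c]

def pvRepr (cs : List Char) : List Char :=
  let quote := if cs.contains '\'' && !cs.contains '"' then '"' else '\''
  quote :: cs.flatMap (pvReprEsc quote) ++ [quote]

-- ===== PORT A =====
-- the for n in range(1, len(stringList)) loop of compactStringList (seplength = separator.length)
def pvLoopA (ws : List (List Char)) (sep : List Char) (maxChars : Nat)
    (n : Nat) (result : List (List Char)) (start nchars : Nat) : List (List Char) :=
  if h : n < ws.length then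
    let i := (PySem.List.pyGetD ws (n : Int) []).length
    if nchars + i + (n - start) * sep.length > maxChars then
      pvLoopA ws sep maxChars (n + 1)
        (result ++ [PySem.Chars.join sep (PySem.List.slice ws (some (start : Int)) (some (n : Int)) ++ [[]])])
        n i
    else
      pvLoopA ws sep maxChars (n + 1) result start (nchars + i)
  else
    result ++ [PySem.Chars.join sep (PySem.List.slice ws (some (start : Int)) (some (ws.length : Int)))]
termination_by ws.length - n
decreasing_by all_goals omega

def pvCompactStringList (stringList : List (List Char)) (separator : List Char) (maxChars : Nat) :
    List (List Char) :=
  if stringList = [] then []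
  else if stringList.length = 1 then stringList   -- stringList[:] (copy = identity here)
  else pvLoopA stringList separator maxChars 1 [] 0 (stringList.headD []).length

def documentationFormat (text : String) : String :=
  if text = "" then "\"\""
  else
    let ll : List (List Char) :=
      (pvSplitlinesKeep text.toList []).foldl
        (fun acc ss => acc ++ pvCompactStringList (PySem.Chars.splitOn ss [' ']) [' '] 60) []
    if ll.length = 1 then String.ofList (pvRepr (ll.headD []))
    else
      let lst := ll.getLastD []
      let lst2 := if lst = [] then ['\n']
                  else if lst.getLastD ' ' ≠ '\n' then lst ++ ['\n'] else lst
      String.ofList ('(' :: PySem.Chars.join ['\n'] ((ll.dropLast ++ [lst2]).map pvRepr) ++ ['\n', ')'])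

-- ===== PORT B =====
-- B's while loop: while len(s) > 60 and ' ' in s: cut = s.rfind(' ', 0, 61); if cut < 0: cut = s.index(' ')
-- (.toNat is exact here: the guard guarantees ' ' ∈ s, so the branch that is used yields a value ≥ 0)
def pvCharLoop (s : List Char) (acc : List (List Char)) : List (List Char) :=
  if _h : 60 < s.length ∧ PySem.Chars.isIn [' '] s = true then
    let r : Int := PySem.Chars.rfindFrom s [' '] 0 (some 61)
    let cut : Nat := (if r < 0 then PySem.Chars.find s [' '] else r).toNat
    pvCharLoop (s.drop (cut + 1)) (acc ++ [s.take (cut + 1)])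
  else acc ++ [s]
termination_by s.length
decreasing_by simp only [List.length_drop]; omega

def documentationFormat_alt (text : String) : String :=
  if text = "" then "\"\""
  else
    let ll : List (List Char) :=
      (pvSplitlinesKeep text.toList []).foldl (fun acc ss => pvCharLoop ss acc) []
    if ll.length = 1 then String.ofList (pvRepr (ll.headD []))
    else
      let lst := ll.getLastD []
      let lst2 := if lst = [] then ['\n']
                  else if lst.getLastD ' ' ≠ '\n' then lst ++ ['\n'] else lst
      String.ofList ('(' :: PySem.Chars.join ['\n'] ((ll.dropLast ++ [lst2]).map pvRepr) ++ ['\n', ')'])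

-- ===== PRECONDITION & SPEC =====
def Spec_documentationFormat (text : String) (out : String) : Prop := out = documentationFormat_alt text
instance (text : String) (out : String) : Decidable (Spec_documentationFormat text out) := by unfold Spec_documentationFormat; infer_instance

-- ===== CLAIM (what is proved, stated in full; the proofs are below) =====
def Claim_equal_documentationFormat : Prop := ∀ (text : String), Dom_documentationFormat text → Spec_documentationFormat text (documentationFormat text)

-- ===== LEMMAS AND PROOFS =====

-- join with a single space, and its length
def pvJn (ws : List (List Char)) : List Char := PySem.Chars.join [' '] ws

theorem pvJn_cons (w : List Char) (ws : List (List Char)) (h : ws ≠ []) :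
    pvJn (w :: ws) = w ++ ' ' :: pvJn ws := by
  cases ws with
  | nil => simp at h
  | cons b l => rw [pvJn, pvJn, PySem.Chars.join_cons_cons]; simp

theorem pvJn_singleton (w : List Char) : pvJn [w] = w := PySem.Chars.join_singleton ..

theorem pvJn_append (a b : List (List Char)) (ha : a ≠ []) (hb : b ≠ []) :
    pvJn (a ++ b) = pvJn a ++ ' ' :: pvJn b := by
  induction a with
  | nil => simp at ha
  | cons w l ih =>
    cases l with
    | nil => rw [List.cons_append, List.nil_append, pvJn_cons _ _ hb]; simp [pvJn_singleton]
    | cons x xs =>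
      rw [List.cons_append, pvJn_cons _ _ (by simp), pvJn_cons _ _ (by simp), ih (by simp)]
      simp

theorem pvJn_split (ws : List (List Char)) (k : Nat) (h1 : 1 ≤ k) (h2 : k < ws.length) :
    pvJn ws = pvJn (ws.take k) ++ ' ' :: pvJn (ws.drop k) := by
  conv_lhs => rw [← List.take_append_drop k ws]
  rw [pvJn_append]
  · rw [Ne, List.take_eq_nil_iff]
    push_neg
    exact ⟨by omega, by intro h; rw [h] at h2; simp at h2⟩
  · rw [Ne, List.drop_eq_nil_iff]
    omega

theorem pvJn_take_mono (ws : List (List Char)) (k l : Nat) (h1 : 1 ≤ k) (h2 : k ≤ l) :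
    (pvJn (ws.take k)).length ≤ (pvJn (ws.take l)).length := by
  by_cases hk : k < (ws.take l).length
  · have : ws.take k = (ws.take l).take k := by rw [List.take_take]; congr 1; omega
    rw [this, pvJn_split (ws.take l) k h1 hk]
    simp
  · have hk' : (ws.take l).length ≤ k := Nat.le_of_not_lt hk
    rw [List.length_take] at hk'
    have : ws.take k = ws.take l := by
      rcases Nat.le_total ws.length l with h | h
      · rw [List.take_of_length_le (by omega), List.take_of_length_le h]
      · have : l = k := by omega
        rw [this]
    rw [this]

-- sum-of-lengths form of the packed length
theorem pvJn_len_sum (cur : List (List Char)) (h : cur ≠ []) :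
    (pvJn cur).length + 1 = (cur.map List.length).sum + cur.length := by
  induction cur with
  | nil => simp at h
  | cons w l ih =>
    cases l with
    | nil => simp [pvJn_singleton]
    | cons x xs =>
      rw [pvJn_cons _ _ (by simp)]
      have := ih (by simp)
      simp only [List.length_append, List.length_cons, List.map_cons, List.sum_cons] at *
      omega

-- the space positions of a join of space-free words
theorem pvSpace_iff (ws : List (List Char)) (hsf : ∀ w ∈ ws, ' ' ∉ w) (hne : ws ≠ [])
    (i : Nat) : (pvJn ws)[i]? = some ' ' ↔ ∃ k, 1 ≤ k ∧ k < ws.length ∧ i = (pvJn (ws.take k)).length := by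
  induction ws generalizing i with
  | nil => simp at hne
  | cons w ws' ih =>
    cases ws' with
    | nil =>
      rw [pvJn_singleton]
      constructor
      · intro h
        exact absurd (List.mem_of_getElem? h) (hsf w (by simp))
      · rintro ⟨k, hk1, hk2, -⟩
        simp at hk2; omega
    | cons x xs =>
      rw [pvJn_cons _ _ (by simp)]
      have htake1 : (pvJn ((w :: x :: xs).take 1)).length = w.length := by
        simp [pvJn_singleton]
      rcases Nat.lt_trichotomy i w.length with hi | hi | hi
      · rw [List.getElem?_append_left hi]
        constructor
        · intro h
          exact absurd (List.mem_of_getElem? h) (hsf w (by simp))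
        · rintro ⟨k, hk1, hk2, hk3⟩
          have := pvJn_take_mono (w :: x :: xs) 1 k (by omega) hk1
          rw [htake1] at this
          omega
      · subst hi
        rw [List.getElem?_append_right (le_refl _)]
        simp only [Nat.sub_self, List.getElem?_cons_zero]
        constructor
        · intro _; exact ⟨1, by omega, by simp, htake1.symm⟩
        · intro _; simp
      · rw [List.getElem?_append_right (by omega)]
        have hsub : i - w.length = (i - w.length - 1) + 1 := by omega
        rw [hsub, List.getElem?_cons_succ]
        rw [ih (fun v hv => hsf v (by simp [hv])) (by simp) (i - w.length - 1)]
        constructor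
        · rintro ⟨k', hk1, hk2, hk3⟩
          refine ⟨k' + 1, by omega, by simp at hk2 ⊢; omega, ?_⟩
          have heq : (w :: x :: xs).take (k' + 1) = w :: (x :: xs).take k' := rfl
          rw [heq, pvJn_cons _ _ (by rw [Ne, List.take_eq_nil_iff]; push_neg; exact ⟨by omega, by simp⟩)]
          simp; omega
        · rintro ⟨k, hk1, hk2, hk3⟩
          rcases Nat.eq_or_lt_of_le hk1 with h1 | h1
          · rw [← h1] at hk3; rw [htake1] at hk3; omega
          refine ⟨k - 1, by omega, by simp at hk2 ⊢; omega, ?_⟩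
          have hk : k = (k - 1) + 1 := by omega
          rw [hk] at hk3
          have heq : (w :: x :: xs).take ((k - 1) + 1) = w :: (x :: xs).take (k - 1) := rfl
          rw [heq, pvJn_cons _ _ (by rw [Ne, List.take_eq_nil_iff]; push_neg; exact ⟨by omega, by simp⟩)] at hk3
          simp at hk3; omega

-- singleton-prefix bridge
theorem pvPrefixSpace (l : List Char) : ([' '] : List Char).isPrefixOf l = (l.head? == some ' ') := by
  cases l with
  | nil => rfl
  | cons c t => simp [List.isPrefixOf, eq_comm]

theorem pvIsIn_iff (ws : List (List Char)) (hsf : ∀ w ∈ ws, ' ' ∉ w) (hne : ws ≠ []) :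
    PySem.Chars.isIn [' '] (pvJn ws) = true ↔ 2 ≤ ws.length := by
  rw [PySem.Chars.isIn_iff_infix]
  constructor
  · intro h
    have hmem : ' ' ∈ pvJn ws := h.sublist.subset (by simp)
    cases ws with
    | nil => simp at hne
    | cons w ws' =>
      cases ws' with
      | nil => rw [pvJn_singleton] at hmem; exact absurd hmem (hsf w (by simp))
      | cons x xs => simp
  · intro h
    cases ws with
    | nil => simp at hne
    | cons w ws' =>
      cases ws' with
      | nil => simp at h
      | cons x xs =>
        rw [pvJn_cons _ _ (by simp)]
        exact ⟨w, pvJn (x :: xs), by simp⟩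

-- rfind.go characterisation (PySem exposes no spec lemma for rfind; these follow its definition)
theorem pvRfindGo_neg (t sub : List Char) (j : Nat)
    (h : ∀ i ≤ j, sub.isPrefixOf (t.drop i) = false) : PySem.Chars.rfind.go t sub j = -1 := by
  induction j with
  | zero =>
    show (if sub.isPrefixOf (t.drop 0) then (0 : Int) else -1) = -1
    rw [if_neg (by rw [h 0 (le_refl 0)]; simp)]
  | succ j ih =>
    show (if sub.isPrefixOf (t.drop (j + 1)) then ((j + 1 : Nat) : Int) else PySem.Chars.rfind.go t sub j) = -1
    rw [if_neg (by rw [h (j + 1) (le_refl _)]; simp)]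
    exact ih fun i hi => h i (Nat.le_succ_of_le hi)

theorem pvRfindGo_pos (t sub : List Char) (i j : Nat) (hij : i ≤ j)
    (hi : sub.isPrefixOf (t.drop i) = true)
    (hmax : ∀ i', i < i' → i' ≤ j → sub.isPrefixOf (t.drop i') = false) :
    PySem.Chars.rfind.go t sub j = (i : Int) := by
  induction j with
  | zero =>
    have : i = 0 := by omega
    subst this
    show (if sub.isPrefixOf (t.drop 0) then (0 : Int) else -1) = ((0 : Nat) : Int)
    rw [if_pos hi]
    simp
  | succ j ih =>
    by_cases hc : i = j + 1
    · subst hc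
      show (if sub.isPrefixOf (t.drop (j + 1)) then ((j + 1 : Nat) : Int) else PySem.Chars.rfind.go t sub j) = _
      rw [if_pos hi]
    · have hij' : i ≤ j := by omega
      show (if sub.isPrefixOf (t.drop (j + 1)) then ((j + 1 : Nat) : Int) else PySem.Chars.rfind.go t sub j) = _
      rw [if_neg (by rw [hmax (j + 1) (by omega) (le_refl _)]; simp)]
      exact ih hij' fun i' h1 h2 => hmax i' h1 (Nat.le_succ_of_le h2)

-- greedy fit count and recursive packing
def pvKfit (ws : List (List Char)) : Nat :=
  (((List.range' 1 (ws.length - 1)).filter (fun k => (pvJn (ws.take k)).length ≤ 60)).getLastD 1)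

theorem pvKfit_pos (ws : List (List Char)) : 1 ≤ pvKfit ws := by
  unfold pvKfit
  rw [List.getLastD_eq_getLast?]
  cases hF : ((List.range' 1 (ws.length - 1)).filter (fun k => (pvJn (ws.take k)).length ≤ 60)).getLast? with
  | none => simp
  | some m =>
    simp only [Option.getD_some]
    have hm := List.mem_of_getLast? hF
    have := (List.mem_filter.mp hm).1
    exact (List.mem_range'_1.mp this).1

def pvPackRec (ws : List (List Char)) : List (List Char) :=
  if ws.length ≤ 1 ∨ (pvJn ws).length ≤ 60 then [pvJn ws]
  else (pvJn (ws.take (pvKfit ws)) ++ [' ']) :: pvPackRec (ws.drop (pvKfit ws))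
termination_by ws.length
decreasing_by
  simp only [List.length_drop]
  have := pvKfit_pos ws
  omega

theorem pvKfit_eq (ws : List (List Char)) (m : Nat) (hlen : 2 ≤ ws.length)
    (hm1 : 1 ≤ m) (hm2 : m < ws.length)
    (hfit : (pvJn (ws.take m)).length ≤ 60 ∨ m = 1)
    (hbig : 60 < (pvJn (ws.take (m + 1))).length) : pvKfit ws = m := by
  unfold pvKfit
  by_cases hfit1 : (pvJn (ws.take m)).length ≤ 60
  · have hsplit : List.range' 1 (ws.length - 1) = List.range' 1 m ++ List.range' (1 + m) (ws.length - 1 - m) := by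
      have h := List.range'_append (s := 1) (m := m) (n := ws.length - 1 - m) (step := 1)
      rw [show 1 + 1 * m = 1 + m by omega, show m + (ws.length - 1 - m) = ws.length - 1 by omega] at h
      exact h.symm
    rw [hsplit, List.filter_append]
    have h1 : (List.range' 1 m).filter (fun k => (pvJn (ws.take k)).length ≤ 60) = List.range' 1 m := by
      apply List.filter_eq_self.mpr
      intro k hk
      rcases List.mem_range'_1.mp hk with ⟨hk1, hk2⟩
      exact decide_eq_true (le_trans (pvJn_take_mono ws k m hk1 (by omega)) hfit1)
    have h2 : (List.range' (1 + m) (ws.length - 1 - m)).filter (fun k => (pvJn (ws.take k)).length ≤ 60) = [] := by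
      apply List.filter_eq_nil_iff.mpr
      intro k hk
      rcases List.mem_range'_1.mp hk with ⟨hk1, hk2⟩
      simp only [decide_eq_true_eq]
      intro hle
      exact absurd (le_trans hbig (pvJn_take_mono ws (m + 1) k (by omega) (by omega))) (by omega)
    rw [h1, h2, List.append_nil]
    have hconc : List.range' 1 m = List.range' 1 (m - 1) ++ [m] := by
      have h := List.range'_concat (s := 1) (n := m - 1) (step := 1)
      rw [show (m - 1) + 1 = m by omega, show 1 + 1 * (m - 1) = m by omega] at h
      exact h
    rw [hconc, List.getLastD_concat]
  · have hm : m = 1 := hfit.resolve_left hfit1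
    subst hm
    have hall : (List.range' 1 (ws.length - 1)).filter (fun k => (pvJn (ws.take k)).length ≤ 60) = [] := by
      apply List.filter_eq_nil_iff.mpr
      intro k hk
      rcases List.mem_range'_1.mp hk with ⟨hk1, hk2⟩
      simp only [decide_eq_true_eq]
      intro hle
      exact hfit1 (le_trans (pvJn_take_mono ws 1 k (le_refl 1) hk1) hle)
    rw [hall]
    rfl

theorem pvKfit_spec (ws : List (List Char)) (hlen : 2 ≤ ws.length)
    (hbig : 60 < (pvJn ws).length) :
    1 ≤ pvKfit ws ∧ pvKfit ws < ws.length ∧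
      60 < (pvJn (ws.take (pvKfit ws + 1))).length ∧
      ((pvJn (ws.take (pvKfit ws))).length ≤ 60 ∨ pvKfit ws = 1) := by
  set m0 := Nat.findGreatest (fun k => 1 ≤ k ∧ (pvJn (ws.take k)).length ≤ 60) (ws.length - 1) with hm0
  by_cases h0 : m0 = 0
  · have hnofit : ∀ k, 1 ≤ k → k ≤ ws.length - 1 → ¬ ((pvJn (ws.take k)).length ≤ 60) := by
      intro k hk1 hk2 hle
      have := Nat.findGreatest_is_greatest (P := fun k => 1 ≤ k ∧ (pvJn (ws.take k)).length ≤ 60)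
        (by omega : m0 < k) hk2
      exact this ⟨hk1, hle⟩
    have hbig2 : 60 < (pvJn (ws.take 2)).length := by
      by_cases h2 : ws.length = 2
      · rwa [List.take_of_length_le (by omega)]
      · have h1 : ¬ ((pvJn (ws.take 1)).length ≤ 60) := hnofit 1 (le_refl 1) (by omega)
        exact lt_of_lt_of_le (by omega) (pvJn_take_mono ws 1 2 (le_refl 1) (by omega))
    have hk := pvKfit_eq ws 1 hlen (le_refl 1) (by omega) (Or.inr rfl) (by simpa using hbig2)
    rw [hk]
    exact ⟨le_refl 1, by omega, by simpa using hbig2, Or.inr rfl⟩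
  · have hpos : 0 < m0 := Nat.pos_of_ne_zero h0
    have hex : ∃ k, k ≤ ws.length - 1 ∧ (1 ≤ k ∧ (pvJn (ws.take k)).length ≤ 60) := by
      by_contra hc
      push_neg at hc
      apply h0
      rw [hm0]
      apply Nat.findGreatest_eq_zero_iff.mpr
      intro m hm0' hmn hP
      have h1 := hc m hmn hP.1
      have h2 := hP.2
      omega
    obtain ⟨k, hkn, hPk⟩ := hex
    have hP : 1 ≤ m0 ∧ (pvJn (ws.take m0)).length ≤ 60 := by
      rw [hm0]
      exact Nat.findGreatest_spec (P := fun k => 1 ≤ k ∧ (pvJn (ws.take k)).length ≤ 60) (m := k) hkn hPk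
    have hle := Nat.findGreatest_le (P := fun k => 1 ≤ k ∧ (pvJn (ws.take k)).length ≤ 60) (ws.length - 1)
    have hm2 : m0 < ws.length := by omega
    have hnext : 60 < (pvJn (ws.take (m0 + 1))).length := by
      by_cases hend : m0 + 1 ≤ ws.length - 1
      · have hng := Nat.findGreatest_is_greatest (P := fun k => 1 ≤ k ∧ (pvJn (ws.take k)).length ≤ 60)
          (n := ws.length - 1) (k := m0 + 1) (by omega) hend
        exact Nat.lt_of_not_le fun hcon => hng ⟨by omega, hcon⟩
      · rw [List.take_of_length_le (by omega)]
        exact hbig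
    have hk := pvKfit_eq ws m0 hlen hP.1 hm2 (Or.inl hP.2) hnext
    rw [hk]
    exact ⟨hP.1, hm2, hnext, Or.inl hP.2⟩

-- the cut the char-level port computes is the length of the greedy prefix
theorem pvCut_eq (ws : List (List Char)) (m : Nat) (hsf : ∀ w ∈ ws, ' ' ∉ w)
    (hlen : 2 ≤ ws.length) (hbig : 60 < (pvJn ws).length)
    (hm1 : 1 ≤ m) (hm2 : m < ws.length)
    (hfit : (pvJn (ws.take m)).length ≤ 60 ∨ m = 1)
    (hnext : 60 < (pvJn (ws.take (m + 1))).length) :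
    (if PySem.Chars.rfindFrom (pvJn ws) [' '] 0 (some 61) < 0
      then PySem.Chars.find (pvJn ws) [' ']
      else PySem.Chars.rfindFrom (pvJn ws) [' '] 0 (some 61)).toNat
      = (pvJn (ws.take m)).length := by
  have hne : ws ≠ [] := by intro h; rw [h] at hlen; simp at hlen
  have hslen : 61 ≤ (pvJn ws).length := hbig
  set s : List Char := pvJn ws with hs
  have hlen61 : (s.take 61).length = 61 := by rw [List.length_take]; omega
  have hrfeq : PySem.Chars.rfindFrom s [' '] 0 (some 61) =
      (if PySem.Chars.rfind.go (s.take 61) [' '] ((s.take 61).length) = -1 then (-1 : Int)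
       else PySem.Chars.rfind.go (s.take 61) [' '] ((s.take 61).length)) := by
    unfold PySem.Chars.rfindFrom
    simp only []
    rw [if_neg (show ¬ ((s.length : Int) < 61) by exact_mod_cast Nat.not_lt.mpr hslen)]
    rw [if_neg (show ¬ ((0 : Int) < 0) by omega)]
    rw [if_neg (show ¬ ((61 : Int) < 0) by omega)]
    rw [if_neg (show ¬ ((61 : Int) < 0) by omega)]
    simp only [Int.toNat_zero, List.drop_zero, PySem.Chars.rfind, zero_add]
    rw [show Int.toNat 61 = 61 from rfl]
  rw [hlen61] at hrfeq
  have hspace : ∀ i : Nat, (s[i]? = some ' ') ↔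
      ∃ k, 1 ≤ k ∧ k < ws.length ∧ i = (pvJn (ws.take k)).length := pvSpace_iff ws hsf hne
  have hprei : ∀ i : Nat,
      ([' '] : List Char).isPrefixOf ((s.take 61).drop i) = ((s.take 61)[i]? == some ' ') := by
    intro i
    rw [pvPrefixSpace, List.head?_drop]
  by_cases hfit1 : (pvJn (ws.take m)).length ≤ 60
  · set c : Nat := (pvJn (ws.take m)).length with hc
    have hcs : s[c]? = some ' ' := (hspace c).mpr ⟨m, hm1, hm2, rfl⟩
    have hgo : PySem.Chars.rfind.go (s.take 61) [' '] 61 = (c : Int) := by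
      apply pvRfindGo_pos
      · omega
      · rw [hprei c, List.getElem?_take, if_pos (by omega), hcs]
        simp
      · intro i' h1 h2
        rw [hprei i', List.getElem?_take]
        by_cases h61 : i' < 61
        · rw [if_pos h61]
          apply beq_eq_false_iff_ne.mpr
          intro hsp
          obtain ⟨k, hk1, hk2, hk3⟩ := (hspace i').mp hsp
          rcases Nat.lt_or_ge k (m + 1) with hkm | hkm
          · have := pvJn_take_mono ws k m hk1 (by omega)
            omega
          · have := pvJn_take_mono ws (m + 1) k (by omega) hkm
            omega
        · rw [if_neg h61]
          simp
    rw [hrfeq, hgo]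
    rw [if_neg (show ¬ ((c : Int) = -1) by omega)]
    rw [if_neg (show ¬ ((c : Int) < 0) by omega)]
    simp
  · have hm1' : m = 1 := hfit.resolve_left hfit1
    subst hm1'
    have hgo : PySem.Chars.rfind.go (s.take 61) [' '] 61 = -1 := by
      apply pvRfindGo_neg
      intro i hi
      rw [hprei i, List.getElem?_take]
      by_cases h61 : i < 61
      · rw [if_pos h61]
        apply beq_eq_false_iff_ne.mpr
        intro hsp
        obtain ⟨k, hk1, hk2, hk3⟩ := (hspace i).mp hsp
        have := pvJn_take_mono ws 1 k (le_refl 1) hk1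
        omega
      · rw [if_neg h61]
        simp
    rw [hrfeq, hgo]
    rw [if_pos rfl, if_pos (show (-1 : Int) < 0 by omega)]
    have hc1len : (pvJn (ws.take 1)).length < s.length := by
      have hsp1 := pvJn_split ws 1 (le_refl 1) (by omega)
      rw [hs, hsp1]
      simp
    have hcs : s[(pvJn (ws.take 1)).length]? = some ' ' :=
      (hspace _).mpr ⟨1, le_refl 1, by omega, rfl⟩
    have hinf : ([' '] : List Char) <:+: s := by
      obtain ⟨l1, l2, hsplit2⟩ := List.append_of_mem (List.mem_of_getElem? hcs)
      exact ⟨l1, l2, by rw [hsplit2]; simp⟩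
    have hnn : 0 ≤ PySem.Chars.find s [' '] := (PySem.Chars.find_nonneg_iff s [' ']).mpr hinf
    obtain ⟨hpre2, hmin⟩ := PySem.Chars.find_spec (s := s) (sub := [' ']) hnn
    have hfs : s[(PySem.Chars.find s [' ']).toNat]? = some ' ' := by
      have hb := List.isPrefixOf_iff_prefix.mpr hpre2
      rw [pvPrefixSpace, List.head?_drop] at hb
      simpa using hb
    obtain ⟨k, hk1, hk2, hk3⟩ := (hspace _).mp hfs
    have hge : (pvJn (ws.take 1)).length ≤ (PySem.Chars.find s [' ']).toNat := by
      have := pvJn_take_mono ws 1 k (le_refl 1) hk1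
      omega
    have hle2 : ¬ ((pvJn (ws.take 1)).length < (PySem.Chars.find s [' ']).toNat) := by
      intro hlt
      have hprefix : ([' '] : List Char) <+: s.drop ((pvJn (ws.take 1)).length) := by
        apply List.isPrefixOf_iff_prefix.mp
        rw [pvPrefixSpace, List.head?_drop, hcs]
        rfl
      exact hmin _ hlt hprefix
    omega

-- B-side word-level intermediate (proof-only): the greedy packing loop
def pvPackLoop (rest : List (List Char)) (cur : List (List Char)) (nchars : Nat)
    (acc : List (List Char)) : List (List Char) :=
  match rest with
  | [] => acc ++ [PySem.Chars.join [' '] cur]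
  | w :: rs =>
    if nchars + w.length + cur.length > 60 then
      pvPackLoop rs [w] w.length (acc ++ [PySem.Chars.join [' '] cur ++ [' ']])
    else
      pvPackLoop rs (cur ++ [w]) (nchars + w.length) acc

def pvPackStart (ws : List (List Char)) (acc : List (List Char)) : List (List Char) :=
  match ws with
  | [] => acc
  | w :: rest => pvPackLoop rest [w] w.length acc

theorem pvJoin_append_nil (sep : List Char) (parts : List (List Char)) (h : parts ≠ []) :
    PySem.Chars.join sep (parts ++ [[]]) = PySem.Chars.join sep parts ++ sep := by
  induction parts with
  | nil => simp at h
  | cons p ps ih =>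
    cases ps with
    | nil =>
      rw [show ([p] ++ [([] : List Char)]) = [p, []] from rfl, PySem.Chars.join_cons_cons,
        PySem.Chars.join_singleton, PySem.Chars.join_singleton]
      simp
    | cons q qs =>
      simp only [List.cons_append]
      rw [PySem.Chars.join_cons_cons, PySem.Chars.join_cons_cons,
        ← List.cons_append, ih (by simp)]
      simp

theorem pvPackLoop_acc (rest : List (List Char)) :
    ∀ (cur acc : List (List Char)) (nchars : Nat),
      pvPackLoop rest cur nchars acc = acc ++ pvPackLoop rest cur nchars [] := by
  induction rest with
  | nil => intro cur acc nchars; simp [pvPackLoop]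
  | cons w rs ih =>
    intro cur acc nchars
    rw [pvPackLoop, pvPackLoop]
    split
    · rw [ih _ (acc ++ _), ih _ ([] ++ _)]
      simp
    · exact ih _ _ _

theorem pvLoopA_eq_packLoop (ws : List (List Char)) (rest : List (List Char)) :
    ∀ (cur acc : List (List Char)) (start nchars : Nat), cur ≠ [] →
      ws.drop start = cur ++ rest → nchars = (cur.map List.length).sum →
      pvLoopA ws [' '] 60 (start + cur.length) acc start nchars = pvPackLoop rest cur nchars acc := by
  induction rest with
  | nil =>
    intro cur acc start nchars hcur hdrop hnch
    have hlen : (ws.drop start).length = ws.length - start := List.length_drop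
    rw [hdrop] at hlen
    have hstart : start ≤ ws.length := by
      by_contra hc
      have : cur = [] := by
        have : ws.drop start = [] := List.drop_eq_nil_of_le (by omega)
        simpa [this] using hdrop.symm
      exact hcur this
    have hn : start + cur.length = ws.length := by simp at hlen; omega
    simp only [List.append_nil] at hdrop hlen
    rw [pvLoopA, dif_neg (by omega)]
    rw [PySem.List.slice_of_nonneg ws (by positivity) (by positivity) (by exact_mod_cast hstart)
        (by exact_mod_cast le_refl ws.length)]
    simp only [Int.toNat_natCast]
    rw [hdrop, List.take_of_length_le (by omega)]
    rw [pvPackLoop]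
  | cons w rs ih =>
    intro cur acc start nchars hcur hdrop hnch
    have hlen : (ws.drop start).length = ws.length - start := List.length_drop
    rw [hdrop] at hlen
    have hstart : start ≤ ws.length := by
      by_contra hc
      have : cur ++ (w :: rs) = [] := by
        rw [← hdrop]; exact List.drop_eq_nil_of_le (by omega)
      simp at this
    have hlt : start + cur.length < ws.length := by simp at hlen; omega
    rw [pvLoopA, dif_pos hlt]
    have hget : PySem.List.pyGetD ws ((start + cur.length : Nat) : Int) [] = w := by
      rw [PySem.List.pyGetD_natCast]
      have h1 : start + cur.length < ws.length := hlt
      rw [List.getD_eq_getElem ws [] h1]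
      have : ws[start + cur.length] = (ws.drop start)[cur.length]'(by simp [List.length_drop]; omega) :=
        (List.getElem_drop).symm
      rw [this]
      simp [hdrop]
    have hslice : PySem.List.slice ws (some (start : Int)) (some ((start + cur.length : Nat) : Int)) = cur := by
      rw [PySem.List.slice_of_nonneg ws (by positivity) (by positivity) (by exact_mod_cast hstart)
          (by exact_mod_cast le_of_lt hlt)]
      simp only [Int.toNat_natCast]
      rw [hdrop]
      simp
    rw [pvPackLoop]
    simp only [hget, hslice, Nat.add_sub_cancel_left, List.length_cons, List.length_nil,
      Nat.zero_add, Nat.mul_one]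
    by_cases hc : 60 < nchars + w.length + cur.length
    · rw [if_pos hc, if_pos hc, pvJoin_append_nil _ _ hcur]
      have := ih [w] (acc ++ [PySem.Chars.join [' '] cur ++ [' ']]) (start + cur.length) w.length
        (by simp) (by rw [← List.drop_drop, hdrop]; simp) (by simp)
      simpa using this
    · rw [if_neg hc, if_neg hc]
      have := ih (cur ++ [w]) acc start (nchars + w.length) (by simp)
        (by rw [hdrop]; simp) (by simp [hnch])
      simpa [Nat.add_assoc] using this

-- small-line case: if the whole remaining line fits, no break ever fires
theorem pvPackSmall (rest : List (List Char)) :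
    ∀ (cur acc : List (List Char)), cur ≠ [] →
      (pvJn (cur ++ rest)).length ≤ 60 →
      pvPackLoop rest cur ((cur.map List.length).sum) acc = acc ++ [pvJn (cur ++ rest)] := by
  induction rest with
  | nil =>
    intro cur acc hcur hle
    simp [pvPackLoop, pvJn]
  | cons x rs ih =>
    intro cur acc hcur hle
    have hsum1 : (pvJn (cur ++ [x])).length + 1 = (cur.map List.length).sum + x.length + (cur.length + 1) := by
      have := pvJn_len_sum (cur ++ [x]) (by simp)
      simpa [Nat.add_assoc, Nat.add_comm, Nat.add_left_comm] using this
    have hmono : (pvJn (cur ++ [x])).length ≤ (pvJn (cur ++ x :: rs)).length := by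
      cases rs with
      | nil => exact le_refl _
      | cons y ys =>
        have h2 : pvJn (cur ++ x :: y :: ys) = pvJn (cur ++ [x]) ++ ' ' :: pvJn (y :: ys) := by
          rw [show cur ++ x :: y :: ys = (cur ++ [x]) ++ (y :: ys) by simp,
            pvJn_append _ _ (by simp) (by simp)]
        rw [h2]
        simp
    rw [pvPackLoop, if_neg (by omega)]
    have := ih (cur ++ [x]) acc (by simp) (by simpa using hle)
    simpa [Nat.add_assoc] using this

theorem pvPack_aux (n : Nat) : ∀ (ws acc : List (List Char)), ws.length ≤ n → ws ≠ [] →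
    pvPackStart ws acc = acc ++ pvPackRec ws := by
  induction n with
  | zero =>
    intro ws acc hn hne
    cases ws with
    | nil => simp at hne
    | cons w rest => simp at hn
  | succ n ihn =>
    intro ws acc hn hne
    rw [pvPackRec]
    by_cases hsmall : ws.length ≤ 1 ∨ (pvJn ws).length ≤ 60
    · rw [if_pos hsmall]
      cases ws with
      | nil => simp at hne
      | cons w rest =>
        cases rest with
        | nil =>
          show pvPackLoop [] [w] w.length acc = acc ++ [pvJn [w]]
          rw [pvPackLoop]
          rfl
        | cons x rs =>
          have hle : (pvJn (w :: x :: rs)).length ≤ 60 := by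
            rcases hsmall with h | h
            · simp at h
            · exact h
          show pvPackLoop (x :: rs) [w] w.length acc = acc ++ [pvJn (w :: x :: rs)]
          have := pvPackSmall (x :: rs) [w] acc (by simp) (by simpa using hle)
          simpa using this
    · rw [if_neg hsmall]
      push_neg at hsmall
      obtain ⟨hlen2', hbig'⟩ := hsmall
      cases ws with
      | nil => simp at hne
      | cons w rest =>
        have hlen2 : 2 ≤ (w :: rest).length := by simpa using hlen2'
        have inner : ∀ (rest2 cur acc2 : List (List Char)), cur ≠ [] →
            w :: rest = cur ++ rest2 →
            (∀ k, 1 ≤ k → k ≤ cur.length → ((pvJn ((w :: rest).take k)).length ≤ 60 ∨ k = 1)) →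
            pvPackLoop rest2 cur ((cur.map List.length).sum) acc2
              = acc2 ++ (pvJn ((w :: rest).take (pvKfit (w :: rest))) ++ [' '])
                  :: pvPackRec ((w :: rest).drop (pvKfit (w :: rest))) := by
          intro rest2
          induction rest2 with
          | nil =>
            intro cur acc2 hcur heq hinv
            exfalso
            rw [List.append_nil] at heq
            have hpos : 1 ≤ cur.length := by
              have := List.length_pos_iff.mpr hcur
              omega
            have hcl : cur.length = (w :: rest).length := by rw [heq]
            have h := hinv cur.length hpos (le_refl _)
            rw [List.take_of_length_le (by omega)] at h
            rcases h with h | h <;> omega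
          | cons x rs2 ihin =>
            intro cur acc2 hcur heq hinv
            have hpos : 1 ≤ cur.length := by
              have := List.length_pos_iff.mpr hcur
              omega
            have hsum : (pvJn (cur ++ [x])).length + 1
                = (cur.map List.length).sum + x.length + (cur.length + 1) := by
              have := pvJn_len_sum (cur ++ [x]) (by simp)
              simpa [Nat.add_assoc, Nat.add_comm, Nat.add_left_comm] using this
            have htake : (w :: rest).take (cur.length + 1) = cur ++ [x] := by
              rw [heq, List.take_append, List.take_of_length_le (by omega),
                show cur.length + 1 - cur.length = 1 by omega]
              rfl
            rw [pvPackLoop]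
            by_cases hbreak : 60 < (pvJn (cur ++ [x])).length
            · rw [if_pos (by omega)]
              have hmlt : cur.length < (w :: rest).length := by rw [heq]; simp
              have hkeq : pvKfit (w :: rest) = cur.length :=
                pvKfit_eq _ _ hlen2 hpos hmlt (hinv cur.length hpos (le_refl _))
                  (by rw [htake]; exact hbreak)
              have htk : (w :: rest).take cur.length = cur := by rw [heq, List.take_left]
              have hdk : (w :: rest).drop cur.length = x :: rs2 := by rw [heq, List.drop_left]
              rw [hkeq, htk, hdk]
              have hnlen : (x :: rs2).length ≤ n := by
                have h1 : (w :: rest).length ≤ n + 1 := hn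
                rw [heq] at h1
                simp at h1 ⊢
                omega
              have houter := ihn (x :: rs2) (acc2 ++ [pvJn cur ++ [' ']]) hnlen (by simp)
              rw [show pvPackLoop rs2 [x] x.length (acc2 ++ [PySem.Chars.join [' '] cur ++ [' ']])
                  = pvPackStart (x :: rs2) (acc2 ++ [pvJn cur ++ [' ']]) from rfl, houter]
              simp
            · rw [if_neg (by omega)]
              have := ihin (cur ++ [x]) acc2 (by simp) (by rw [heq]; simp)
                (fun k hk1 hk2 => by
                  rcases Nat.lt_or_ge k (cur.length + 1) with hlt | hge
                  · exact hinv k hk1 (by omega)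
                  · have hkeq2 : k = cur.length + 1 := by simp at hk2; omega
                    subst hkeq2
                    left
                    rw [htake]
                    omega)
              simpa [Nat.add_assoc] using this
        have := inner rest [w] acc (by simp) (by simp) (fun k hk1 hk2 => by simp at hk2; right; omega)
        show pvPackLoop rest [w] w.length acc = _
        simpa using this

theorem pvPack_eq_packRec (ws : List (List Char)) (acc : List (List Char)) (hne : ws ≠ []) :
    pvPackStart ws acc = acc ++ pvPackRec ws :=
  pvPack_aux ws.length ws acc (le_refl _) hne

theorem pvChar_eq_packRec (ws : List (List Char)) (acc : List (List Char)) (hne : ws ≠ [])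
    (hsf : ∀ w ∈ ws, ' ' ∉ w) :
    pvCharLoop (pvJn ws) acc = acc ++ pvPackRec ws := by
  have haux : ∀ (n : Nat) (ws acc : List (List Char)), ws.length ≤ n → ws ≠ [] →
      (∀ w ∈ ws, ' ' ∉ w) → pvCharLoop (pvJn ws) acc = acc ++ pvPackRec ws := by
    intro n
    induction n with
    | zero =>
      intro ws acc hn hne _
      cases ws with
      | nil => simp at hne
      | cons w rest => simp at hn
    | succ n ihn =>
      intro ws acc hn hne hsf
      rw [pvCharLoop]
      by_cases hg : 60 < (pvJn ws).length ∧ PySem.Chars.isIn [' '] (pvJn ws) = true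
      · rw [dif_pos hg]
        have hlen2 : 2 ≤ ws.length := (pvIsIn_iff ws hsf hne).mp hg.2
        obtain ⟨hk1, hk2, hknext, hkfit⟩ := pvKfit_spec ws hlen2 hg.1
        have hcut := pvCut_eq ws (pvKfit ws) hsf hlen2 hg.1 hk1 hk2 hkfit hknext
        show pvCharLoop ((pvJn ws).drop
            ((if PySem.Chars.rfindFrom (pvJn ws) [' '] 0 (some 61) < 0
              then PySem.Chars.find (pvJn ws) [' ']
              else PySem.Chars.rfindFrom (pvJn ws) [' '] 0 (some 61)).toNat + 1))
          (acc ++ [(pvJn ws).take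
            ((if PySem.Chars.rfindFrom (pvJn ws) [' '] 0 (some 61) < 0
              then PySem.Chars.find (pvJn ws) [' ']
              else PySem.Chars.rfindFrom (pvJn ws) [' '] 0 (some 61)).toNat + 1)])
          = acc ++ pvPackRec ws
        rw [hcut]
        have hsplit := pvJn_split ws (pvKfit ws) hk1 hk2
        rw [hsplit, List.take_append, List.drop_append]
        rw [List.take_of_length_le (show (pvJn (ws.take (pvKfit ws))).length ≤
          (pvJn (ws.take (pvKfit ws))).length + 1 by omega)]
        rw [List.drop_eq_nil_of_le (show (pvJn (ws.take (pvKfit ws))).length ≤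
          (pvJn (ws.take (pvKfit ws))).length + 1 by omega)]
        rw [show (pvJn (ws.take (pvKfit ws))).length + 1 - (pvJn (ws.take (pvKfit ws))).length = 1
            by omega]
        rw [show List.take 1 (' ' :: pvJn (ws.drop (pvKfit ws))) = [' '] from rfl,
          show List.drop 1 (' ' :: pvJn (ws.drop (pvKfit ws))) = pvJn (ws.drop (pvKfit ws)) from rfl,
          List.nil_append]
        have hdne : ws.drop (pvKfit ws) ≠ [] := by
          rw [Ne, List.drop_eq_nil_iff]
          omega
        have hdlen : (ws.drop (pvKfit ws)).length ≤ n := by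
          rw [List.length_drop]
          omega
        rw [ihn (ws.drop (pvKfit ws)) (acc ++ [pvJn (ws.take (pvKfit ws)) ++ [' ']]) hdlen hdne
          (fun w hw => hsf w (List.drop_subset _ _ hw))]
        conv_rhs => rw [pvPackRec]
        rw [if_neg (by push_neg; exact ⟨by omega, hg.1⟩)]
        simp
      · rw [dif_neg hg]
        have hsmall : ws.length ≤ 1 ∨ (pvJn ws).length ≤ 60 := by
          by_cases hl : 2 ≤ ws.length
          · right
            by_contra hb
            exact hg ⟨by omega, (pvIsIn_iff ws hsf hne).mpr hl⟩
          · left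
            omega
        rw [pvPackRec, if_pos hsmall]
  exact haux ws.length ws acc (le_refl _) hne hsf

-- splitOn bridge: PySem's fuel-based splitOn s [' '] equals this structural split
def pvSplitSp : List Char → List (List Char)
  | [] => [[]]
  | c :: rest =>
    if c = ' ' then [] :: pvSplitSp rest
    else
      match pvSplitSp rest with
      | [] => [[c]]
      | w :: ws => (c :: w) :: ws

theorem pvSplitSp_ne_nil (s : List Char) : pvSplitSp s ≠ [] := by
  cases s with
  | nil => simp [pvSplitSp]
  | cons c rest =>
    rw [pvSplitSp]
    by_cases hc : c = ' '
    · simp [hc]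
    · rw [if_neg hc]
      cases h : pvSplitSp rest <;> simp

theorem pvSplitGo (fuel : Nat) : ∀ (l cur : List Char) (acc : List (List Char)), l.length < fuel →
    PySem.Chars.splitOn.go [' '] fuel l cur acc
      = acc.reverse ++ (cur.reverse ++ (pvSplitSp l).headD []) :: (pvSplitSp l).tail := by
  induction fuel with
  | zero => intro l cur acc hl; omega
  | succ f ih =>
    intro l cur acc hl
    cases l with
    | nil =>
      show (cur.reverse :: acc).reverse = _
      simp [pvSplitSp]
    | cons c rest =>
      show (if ([' '] : List Char).isPrefixOf (c :: rest) then
              PySem.Chars.splitOn.go [' '] f (List.drop 1 (c :: rest)) [] (cur.reverse :: acc)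
            else PySem.Chars.splitOn.go [' '] f rest (c :: cur) acc) = _
      rw [pvPrefixSpace]
      by_cases hc : c = ' '
      · subst hc
        rw [if_pos (by simp), show List.drop 1 (' ' :: rest) = rest from rfl]
        rw [ih rest [] (cur.reverse :: acc) (by simp at hl ⊢; omega)]
        rw [pvSplitSp, if_pos rfl]
        cases h : pvSplitSp rest with
        | nil => exact absurd h (pvSplitSp_ne_nil rest)
        | cons w ws => simp
      · rw [if_neg (by simp [hc])]
        rw [ih rest (c :: cur) acc (by simp at hl ⊢; omega)]
        rw [pvSplitSp, if_neg hc]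
        cases h : pvSplitSp rest with
        | nil => exact absurd h (pvSplitSp_ne_nil rest)
        | cons w ws => simp

theorem pvSplitOn_eq (s : List Char) : PySem.Chars.splitOn s [' '] = pvSplitSp s := by
  show PySem.Chars.splitOn.go [' '] (s.length + 1) s [] [] = _
  rw [pvSplitGo (s.length + 1) s [] [] (by omega)]
  cases h : pvSplitSp s with
  | nil => exact absurd h (pvSplitSp_ne_nil s)
  | cons w ws => simp

theorem pvSplitSp_spacefree (s : List Char) : ∀ w ∈ pvSplitSp s, ' ' ∉ w := by
  induction s with
  | nil => simp [pvSplitSp]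
  | cons c rest ih =>
    rw [pvSplitSp]
    by_cases hc : c = ' '
    · rw [if_pos hc]
      intro w hw
      rcases List.mem_cons.mp hw with h | h
      · simp [h]
      · exact ih w h
    · rw [if_neg hc]
      cases h : pvSplitSp rest with
      | nil => exact absurd h (pvSplitSp_ne_nil rest)
      | cons w' ws =>
        intro w hw
        rcases List.mem_cons.mp hw with h1 | h1
        · subst h1
          intro hmem
          rcases List.mem_cons.mp hmem with h2 | h2
          · exact hc h2.symm
          · exact ih w' (h ▸ List.mem_cons_self ..) h2
        · exact ih w (h ▸ List.mem_cons_of_mem _ h1)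

theorem pvJn_splitSp (s : List Char) : pvJn (pvSplitSp s) = s := by
  induction s with
  | nil => simp [pvSplitSp, pvJn_singleton]
  | cons c rest ih =>
    rw [pvSplitSp]
    by_cases hc : c = ' '
    · rw [if_pos hc, pvJn_cons _ _ (pvSplitSp_ne_nil rest), ih, hc]
      simp
    · rw [if_neg hc]
      cases h : pvSplitSp rest with
      | nil => exact absurd h (pvSplitSp_ne_nil rest)
      | cons w ws =>
        rw [h] at ih
        cases ws with
        | nil => rw [pvJn_singleton] at ih ⊢; rw [ih]
        | cons y ys =>
          rw [pvJn_cons _ _ (by simp)] at ih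
          rw [pvJn_cons _ _ (by simp), ← ih]
          simp

theorem pvPackStart_eq_compact (ws : List (List Char)) (acc : List (List Char)) (hne : ws ≠ []) :
    pvPackStart ws acc = acc ++ pvCompactStringList ws [' '] 60 := by
  cases ws with
  | nil => simp at hne
  | cons w ws' =>
    cases ws' with
    | nil =>
      show pvPackLoop [] [w] w.length acc = _
      rw [pvPackLoop, pvCompactStringList]
      rw [if_neg (by simp), if_pos (by simp)]
      rw [PySem.Chars.join_singleton]
    | cons x rs =>
      show pvPackLoop (x :: rs) [w] w.length acc = _
      rw [pvCompactStringList, if_neg (by simp), if_neg (by simp)]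
      have := pvLoopA_eq_packLoop (w :: x :: rs) (x :: rs) [w] [] 0 w.length
        (by simp) (by simp) (by simp)
      simp only [List.length_singleton, Nat.zero_add] at this
      rw [List.headD_cons, this, pvPackLoop_acc]

theorem pvLine_eq (ss : List Char) (acc : List (List Char)) :
    pvCharLoop ss acc = acc ++ pvCompactStringList (PySem.Chars.splitOn ss [' ']) [' '] 60 := by
  have hne := pvSplitSp_ne_nil ss
  rw [pvSplitOn_eq]
  calc pvCharLoop ss acc
      = pvCharLoop (pvJn (pvSplitSp ss)) acc := by rw [pvJn_splitSp]
    _ = acc ++ pvPackRec (pvSplitSp ss) := pvChar_eq_packRec _ _ hne (pvSplitSp_spacefree ss)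
    _ = pvPackStart (pvSplitSp ss) acc := (pvPack_eq_packRec _ _ hne).symm
    _ = acc ++ pvCompactStringList (pvSplitSp ss) [' '] 60 := pvPackStart_eq_compact _ _ hne

theorem pvFoldl_eq (lines : List (List Char)) (acc : List (List Char)) :
    lines.foldl (fun acc ss => pvCharLoop ss acc) acc =
      lines.foldl (fun acc ss => acc ++ pvCompactStringList (PySem.Chars.splitOn ss [' ']) [' '] 60) acc := by
  induction lines generalizing acc with
  | nil => rfl
  | cons l ls ih => rw [List.foldl_cons, List.foldl_cons, pvLine_eq]; exact ih _

-- ===== VERDICT (by name: the statement is the Claim_ definition above) =====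
theorem documentationFormat_spec : Claim_equal_documentationFormat := by
  intro text _
  unfold Spec_documentationFormat documentationFormat documentationFormat_alt
  rw [pvFoldl_eq]
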